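-- pv_equiv track=rewrite | github.com/wittachai-as/WordCraft | wordcraft_game/word2vec_seed.py | _is_trivial_variant
-- ===== SOURCE A (Python) =====
-- from typing import Dict, List, Tuple
--
-- def _is_trivial_variant(candidate: str, inputs: List[str]) -> bool:
--     """Avoid trivial variants such as plural-only forms of inputs."""
--     cand = candidate.lower()
--     normalized_inputs = {x.lower() for x in inputs}
--     if cand in normalized_inputs:
--         return True
--     # simple plural/singular strip 's'
--     if cand.endswith('s') and cand[:-1] in normalized_inputs:
--         return True
--     if any(x.endswith('s') and x[:-1] == cand for x in normalized_inputs):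
--         return True
--     return False
-- ===== SOURCE B (Python) =====
-- def _is_trivial_variant(candidate, inputs):
--     """Avoid trivial variants such as plural-only forms of inputs."""
--     # Build the closure of every input under trivial pluralization, then one lookup.
--     variants = set()
--     for x in inputs:
--         lx = x.lower()
--         variants.add(lx)
--         variants.add(lx + 's')
--         if lx.endswith('s'):
--             variants.add(lx[:-1])
--     return candidate.lower() in variants
-- ===== Notes on version B (the rewrite author's own statement) =====
-- stated objective: alternative
-- what changed: Inverts the indexing: instead of normalizing the inputs into a set and running three candidate-derived queries (exact, candidate minus 's', any input minus 's'), B precomputes the closure of every input under trivial pluralization (itself, plus 's', minus trailing 's') into one set and answers with a single membership test of the lowered candidate.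
import Mathlib
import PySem

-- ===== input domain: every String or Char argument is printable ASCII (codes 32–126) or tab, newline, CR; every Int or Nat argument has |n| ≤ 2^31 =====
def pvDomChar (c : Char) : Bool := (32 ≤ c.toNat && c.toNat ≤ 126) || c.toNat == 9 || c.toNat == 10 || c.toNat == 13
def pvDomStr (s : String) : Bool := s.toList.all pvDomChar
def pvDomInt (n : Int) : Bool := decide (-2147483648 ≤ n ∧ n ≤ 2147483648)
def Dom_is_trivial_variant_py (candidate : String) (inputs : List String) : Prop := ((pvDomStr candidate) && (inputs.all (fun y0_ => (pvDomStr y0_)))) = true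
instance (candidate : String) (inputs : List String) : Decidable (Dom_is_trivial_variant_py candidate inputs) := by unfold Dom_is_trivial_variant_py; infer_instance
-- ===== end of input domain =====

-- B inverts A's indexing: it precomputes the closure of every input under trivial pluralization
-- (itself, plus 's', minus trailing 's') into one set and answers with a single membership test.

-- ===== PORT A =====
def is_trivial_variant_py (candidate : String) (inputs : List String) : Bool :=
  let cand := PySem.Str.lower candidate
  let normalized_inputs : PySem.Set String :=
    PySem.Set.ofList (inputs.map (fun x => PySem.Str.lower x))
  if PySem.Set.contains normalized_inputs cand then true
  else if PySem.Str.endswith cand "s"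
          && PySem.Set.contains normalized_inputs (PySem.Str.slice cand none (some (-1))) then true
  else if normalized_inputs.any (fun x =>
          PySem.Str.endswith x "s" && decide (PySem.Str.slice x none (some (-1)) = cand)) then true
  else false

-- ===== PORT B =====
def addVariants (variants : PySem.Set String) (x : String) : PySem.Set String :=
  let lx := PySem.Str.lower x
  let v1 := PySem.Set.add variants lx
  let v2 := PySem.Set.add v1 (lx ++ "s")
  if PySem.Str.endswith lx "s" then
    PySem.Set.add v2 (PySem.Str.slice lx none (some (-1)))
  else v2

def is_trivial_variant_py_alt (candidate : String) (inputs : List String) : Bool :=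
  let variants : PySem.Set String := inputs.foldl addVariants PySem.Set.empty
  PySem.Set.contains variants (PySem.Str.lower candidate)

-- ===== PRECONDITION & SPEC =====
def Spec_is_trivial_variant_py (candidate : String) (inputs : List String) (out : Bool) : Prop := out = is_trivial_variant_py_alt candidate inputs
instance (candidate : String) (inputs : List String) (out : Bool) : Decidable (Spec_is_trivial_variant_py candidate inputs out) := by unfold Spec_is_trivial_variant_py; infer_instance

-- ===== CLAIM =====
def Claim_equal_is_trivial_variant_py : Prop := ∀ (candidate : String) (inputs : List String), Dom_is_trivial_variant_py candidate inputs → Spec_is_trivial_variant_py candidate inputs (is_trivial_variant_py candidate inputs)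

-- ===== LEMMAS AND PROOFS =====

-- 'cand = lx + "s"' is the same fact as 'cand ends with "s" and cand[:-1] = lx'
theorem eq_append_s_iff (c l : String) :
    c = l ++ "s" ↔ (PySem.Str.endswith c "s" = true ∧ PySem.Str.slice c none (some (-1)) = l) := by
  constructor
  · rintro rfl
    constructor
    · simp [PySem.Str.endswith_eq, PySem.Chars.endswith_iff]
    · apply String.toList_injective
      rw [PySem.Str.slice_to_neg_one, String.toList_append]
      have hs1 : ("s" : String).toList = ['s'] := rfl
      rw [hs1]
      simp
  · rintro ⟨he, rfl⟩
    simp only [PySem.Str.endswith_eq, PySem.Chars.endswith_iff] at he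
    obtain ⟨t, ht⟩ := he
    apply String.toList_injective
    have hsl : c.toList ≠ [] := by
      intro h; rw [h] at ht; simp at ht
    rw [String.toList_append, PySem.Str.slice_to_neg_one, ← ht]
    have hs1 : ("s" : String).toList = ['s'] := rfl
    rw [hs1]
    simp

-- membership in B's variant-closure set
theorem mem_foldl_addVariants (inputs : List String) (s : PySem.Set String) (y : String) :
    y ∈ inputs.foldl addVariants s ↔ y ∈ s ∨ ∃ x ∈ inputs,
      (y = PySem.Str.lower x ∨ y = PySem.Str.lower x ++ "s"
        ∨ (PySem.Str.endswith (PySem.Str.lower x) "s" = true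
            ∧ y = PySem.Str.slice (PySem.Str.lower x) none (some (-1)))) := by
  induction inputs generalizing s with
  | nil => simp
  | cons x rest ih =>
    rw [List.foldl_cons, ih]
    have hstep : y ∈ addVariants s x ↔ y ∈ s ∨
        (y = PySem.Str.lower x ∨ y = PySem.Str.lower x ++ "s"
          ∨ (PySem.Str.endswith (PySem.Str.lower x) "s" = true
              ∧ y = PySem.Str.slice (PySem.Str.lower x) none (some (-1)))) := by
      simp only [addVariants]
      by_cases h : PySem.Str.endswith (PySem.Str.lower x) "s" = true
      · rw [if_pos h]
        simp only [PySem.Set.mem_add]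
        constructor
        · rintro (((hs | h1) | h2) | h3)
          · exact Or.inl hs
          · exact Or.inr (Or.inl h1)
          · exact Or.inr (Or.inr (Or.inl h2))
          · exact Or.inr (Or.inr (Or.inr ⟨h, h3⟩))
        · rintro (hs | h1 | h2 | ⟨_, h3⟩)
          · exact Or.inl (Or.inl (Or.inl hs))
          · exact Or.inl (Or.inl (Or.inr h1))
          · exact Or.inl (Or.inr h2)
          · exact Or.inr h3
      · rw [if_neg h]
        simp only [PySem.Set.mem_add]
        constructor
        · rintro ((hs | h1) | h2)
          · exact Or.inl hs
          · exact Or.inr (Or.inl h1)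
          · exact Or.inr (Or.inr (Or.inl h2))
        · rintro (hs | h1 | h2 | ⟨he, _⟩)
          · exact Or.inl (Or.inl hs)
          · exact Or.inl (Or.inr h1)
          · exact Or.inr h2
          · exact absurd he h
    rw [hstep]
    simp only [List.mem_cons]
    constructor
    · rintro ((hs | hx) | ⟨z, hz, hp⟩)
      · exact Or.inl hs
      · exact Or.inr ⟨x, Or.inl rfl, hx⟩
      · exact Or.inr ⟨z, Or.inr hz, hp⟩
    · rintro (hs | ⟨z, (rfl | hz), hp⟩)
      · exact Or.inl (Or.inl hs)
      · exact Or.inl (Or.inr hp)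
      · exact Or.inr ⟨z, hz, hp⟩

-- A returns true iff some input matches one of the three conditions
theorem portA_eq_true_iff (cand : String) (inputs : List String) :
    is_trivial_variant_py cand inputs = true ↔ ∃ x ∈ inputs, (PySem.Str.lower x = PySem.Str.lower cand
      ∨ (PySem.Str.endswith (PySem.Str.lower cand) "s" = true ∧ PySem.Str.slice (PySem.Str.lower cand) none (some (-1)) = PySem.Str.lower x)
      ∨ (PySem.Str.endswith (PySem.Str.lower x) "s" = true ∧ PySem.Str.slice (PySem.Str.lower x) none (some (-1)) = PySem.Str.lower cand)) := by
  simp only [is_trivial_variant_py]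
  split_ifs with h1 h2 h3
  · simp only [PySem.Set.contains_iff, PySem.Set.mem_ofList, List.mem_map] at h1
    obtain ⟨x, hx, hlx⟩ := h1
    exact iff_of_true rfl ⟨x, hx, Or.inl hlx⟩
  · simp only [Bool.and_eq_true, PySem.Set.contains_iff, PySem.Set.mem_ofList, List.mem_map] at h2
    obtain ⟨he, x, hx, hlx⟩ := h2
    exact iff_of_true rfl ⟨x, hx, Or.inr (Or.inl ⟨he, hlx.symm⟩)⟩
  · simp only [List.any_eq_true, Bool.and_eq_true, decide_eq_true_eq,
      PySem.Set.mem_ofList, List.mem_map] at h3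
    obtain ⟨y, ⟨x, hx, hlx⟩, he, hsl⟩ := h3
    subst hlx
    exact iff_of_true rfl ⟨x, hx, Or.inr (Or.inr ⟨he, hsl⟩)⟩
  · simp only [false_iff]
    rintro ⟨x, hx, hP⟩
    rcases hP with h | ⟨he, hs⟩ | ⟨he, hs⟩
    · exact h1 (by
        simp only [PySem.Set.contains_iff, PySem.Set.mem_ofList, List.mem_map]
        exact ⟨x, hx, h⟩)
    · exact h2 (by
        simp only [Bool.and_eq_true, PySem.Set.contains_iff, PySem.Set.mem_ofList, List.mem_map]
        exact ⟨he, x, hx, hs.symm⟩)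
    · exact h3 (by
        simp only [List.any_eq_true, Bool.and_eq_true, decide_eq_true_eq,
          PySem.Set.mem_ofList, List.mem_map]
        exact ⟨PySem.Str.lower x, ⟨x, hx, rfl⟩, he, hs⟩)

-- ===== VERDICT =====
theorem is_trivial_variant_py_spec : Claim_equal_is_trivial_variant_py := by
  intro candidate inputs _
  unfold Spec_is_trivial_variant_py is_trivial_variant_py_alt
  rw [Bool.eq_iff_iff, portA_eq_true_iff]
  rw [show (PySem.Set.contains (inputs.foldl addVariants PySem.Set.empty) (PySem.Str.lower candidate) = true)
      ↔ PySem.Str.lower candidate ∈ inputs.foldl addVariants PySem.Set.empty from PySem.Set.contains_iff _ _]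
  rw [mem_foldl_addVariants]
  simp only [PySem.Set.empty, List.not_mem_nil, false_or]
  constructor
  · rintro ⟨x, hx, h | ⟨he, hs⟩ | ⟨he, hs⟩⟩
    · exact ⟨x, hx, Or.inl h.symm⟩
    · exact ⟨x, hx, Or.inr (Or.inl ((eq_append_s_iff _ _).mpr ⟨he, hs⟩))⟩
    · exact ⟨x, hx, Or.inr (Or.inr ⟨he, hs.symm⟩)⟩
  · rintro ⟨x, hx, h | h | ⟨he, hs⟩⟩
    · exact ⟨x, hx, Or.inl h.symm⟩
    · obtain ⟨he, hs⟩ := (eq_append_s_iff _ _).mp h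
      exact ⟨x, hx, Or.inr (Or.inl ⟨he, hs⟩)⟩
    · exact ⟨x, hx, Or.inr (Or.inr ⟨he, hs.symm⟩)⟩
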